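-- pv_equiv track=rewrite | github.com/ralborta/conciliador-ia | conciliador_ia/services/cliente_processor_inteligente.py | _es_archivo_xubio
-- ===== SOURCE A (Python) =====
-- from typing import Dict, List, Any, Optional
--
-- def _es_archivo_xubio(columnas_lower: List[str]) -> bool:
--     """Detecta si es archivo maestro de Xubio"""
--     patrones_xubio = [
--         'cuit', 'dni', 'identificador', 'documento',
--         'nombre', 'razon', 'cliente'
--     ]
--
--     coincidencias = sum(1 for patron in patrones_xubio
--                       if any(patron in col for col in columnas_lower))
--
--     return coincidencias >= 2
-- ===== SOURCE B (Python) =====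
-- def _es_archivo_xubio(columnas_lower):
--     """Detecta si es archivo maestro de Xubio"""
--     patrones_xubio = [
--         'cuit', 'dni', 'identificador', 'documento',
--         'nombre', 'razon', 'cliente'
--     ]
--     matched = set()
--     for col in columnas_lower:
--         for patron in patrones_xubio:
--             if patron in col:
--                 matched.add(patron)
--         if len(matched) >= 2:
--             return True
--     return False
-- ===== Notes on version B (the rewrite author's own statement) =====
-- stated objective: alternative
-- what changed: Inverts the loop nesting: instead of counting, per pattern, whether any column contains it, B scans the columns once, accumulates the set of patterns matched so far, and returns True as soon as two distinct patterns have been seen (early exit).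
import Mathlib
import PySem

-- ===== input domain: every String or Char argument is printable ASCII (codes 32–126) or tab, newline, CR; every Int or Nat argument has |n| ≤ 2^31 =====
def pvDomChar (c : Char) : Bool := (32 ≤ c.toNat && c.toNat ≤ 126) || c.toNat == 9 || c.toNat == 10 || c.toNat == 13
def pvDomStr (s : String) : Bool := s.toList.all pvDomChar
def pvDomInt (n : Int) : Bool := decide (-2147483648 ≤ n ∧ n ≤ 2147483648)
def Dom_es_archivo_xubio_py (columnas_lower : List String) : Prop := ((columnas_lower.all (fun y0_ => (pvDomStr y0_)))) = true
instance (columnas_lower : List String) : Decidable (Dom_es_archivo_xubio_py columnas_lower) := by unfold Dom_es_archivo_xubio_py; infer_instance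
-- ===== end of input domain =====

-- B inverts the loop nesting: one pass over the columns maintaining the set of patterns matched so far, returning true as soon as 2 distinct patterns are seen.


-- ===== PORT A =====
-- literal port of A: for each pattern, count it if any column contains it; compare the count with 2
def es_archivo_xubio_py (columnas_lower : List String) : Bool :=
  let patrones_xubio : List String :=
    ["cuit", "dni", "identificador", "documento", "nombre", "razon", "cliente"]
  let coincidencias : Nat := patrones_xubio.foldl
    (fun acc patron =>
      if columnas_lower.any (fun col => PySem.Str.isIn patron col) then acc + 1 else acc) 0
  decide (2 ≤ coincidencias)

-- ===== PORT B =====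
-- inner loop of B: add to the set every pattern contained in this column
def xubioAltStep (col : String) (matched : PySem.Set String) : PySem.Set String :=
  (["cuit", "dni", "identificador", "documento", "nombre", "razon", "cliente"] : List String).foldl
    (fun s patron => if PySem.Str.isIn patron col then PySem.Set.add s patron else s) matched

-- outer loop of B: scan columns, early return true once the matched set has ≥ 2 elements
def xubioAltLoop (cols : List String) (matched : PySem.Set String) : Bool :=
  match cols with
  | [] => false
  | col :: rest =>
      let m := xubioAltStep col matched
      if 2 ≤ m.length then true else xubioAltLoop rest m

def es_archivo_xubio_py_alt (columnas_lower : List String) : Bool :=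
  xubioAltLoop columnas_lower PySem.Set.empty

-- ===== PRECONDITION & SPEC =====
def Spec_es_archivo_xubio_py (columnas_lower : List String) (out : Bool) : Prop := out = es_archivo_xubio_py_alt columnas_lower
instance (columnas_lower : List String) (out : Bool) : Decidable (Spec_es_archivo_xubio_py columnas_lower out) := by unfold Spec_es_archivo_xubio_py; infer_instance

-- ===== CLAIM (what is proved, stated in full; the proofs are below) =====
def Claim_equal_es_archivo_xubio_py : Prop := ∀ (columnas_lower : List String), Dom_es_archivo_xubio_py columnas_lower → Spec_es_archivo_xubio_py columnas_lower (es_archivo_xubio_py columnas_lower)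

-- ===== LEMMAS AND PROOFS =====

-- inner fold: membership
theorem inner_mem (pats : List String) (c : String) (m : PySem.Set String) (y : String) :
    y ∈ pats.foldl (fun s patron => if PySem.Str.isIn patron c = true then PySem.Set.add s patron else s) m
      ↔ y ∈ m ∨ (y ∈ pats ∧ PySem.Str.isIn y c = true) := by
  induction pats generalizing m with
  | nil => simp
  | cons p rest ih =>
      rw [List.foldl_cons, ih]
      by_cases h : PySem.Str.isIn p c = true
      · rw [if_pos h, PySem.Set.mem_add]
        constructor
        · rintro ((hy | rfl) | ⟨hy, hc⟩)
          · exact Or.inl hy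
          · exact Or.inr ⟨List.mem_cons_self, h⟩
          · exact Or.inr ⟨List.mem_cons_of_mem _ hy, hc⟩
        · rintro (hy | ⟨hp, hc⟩)
          · exact Or.inl (Or.inl hy)
          · rcases List.mem_cons.mp hp with rfl | hp'
            · exact Or.inl (Or.inr rfl)
            · exact Or.inr ⟨hp', hc⟩
      · rw [if_neg h]
        constructor
        · rintro (hy | ⟨hy, hc⟩)
          · exact Or.inl hy
          · exact Or.inr ⟨List.mem_cons_of_mem _ hy, hc⟩
        · rintro (hy | ⟨hp, hc⟩)
          · exact Or.inl hy
          · rcases List.mem_cons.mp hp with rfl | hp'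
            · exact absurd hc h
            · exact Or.inr ⟨hp', hc⟩

-- inner fold: nodup preserved
theorem inner_nodup (pats : List String) (c : String) (m : PySem.Set String) (hm : m.Nodup) :
    (pats.foldl (fun s patron => if PySem.Str.isIn patron c = true then PySem.Set.add s patron else s) m).Nodup := by
  induction pats generalizing m with
  | nil => simpa
  | cons p rest ih =>
      rw [List.foldl_cons]
      apply ih
      split
      · exact PySem.Set.nodup_add _ _ hm
      · exact hm

-- inner fold: length does not decrease
theorem inner_len (pats : List String) (c : String) (m : PySem.Set String) :
    m.length ≤ (pats.foldl (fun s patron => if PySem.Str.isIn patron c = true then PySem.Set.add s patron else s) m).length := by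
  induction pats generalizing m with
  | nil => simp
  | cons p rest ih =>
      rw [List.foldl_cons]
      refine le_trans ?_ (ih _)
      split
      · rw [PySem.Set.add_eq_ite]
        split
        · exact le_refl _
        · simp
      · exact le_refl _

-- B's inner loop, characterised through inner_mem / inner_nodup / inner_len
theorem step_mem (c : String) (m : PySem.Set String) (y : String) :
    y ∈ xubioAltStep c m
      ↔ y ∈ m ∨ (y ∈ (["cuit", "dni", "identificador", "documento", "nombre", "razon", "cliente"] : List String)
                  ∧ PySem.Str.isIn y c = true) :=
  inner_mem _ c m y

theorem step_nodup (c : String) (m : PySem.Set String) (hm : m.Nodup) : (xubioAltStep c m).Nodup :=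
  inner_nodup _ c m hm

theorem step_len (c : String) (m : PySem.Set String) : m.length ≤ (xubioAltStep c m).length :=
  inner_len _ c m

-- outer fold: membership
theorem outer_mem (cols : List String) (m : PySem.Set String) (y : String) :
    y ∈ cols.foldl (fun s col => xubioAltStep col s) m
      ↔ y ∈ m ∨ (y ∈ (["cuit", "dni", "identificador", "documento", "nombre", "razon", "cliente"] : List String)
                  ∧ ∃ c ∈ cols, PySem.Str.isIn y c = true) := by
  induction cols generalizing m with
  | nil => simp
  | cons c rest ih =>
      rw [List.foldl_cons, ih, step_mem]
      constructor
      · rintro ((hy | ⟨hp, hc⟩) | ⟨hp, d, hd, hdc⟩)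
        · exact Or.inl hy
        · exact Or.inr ⟨hp, c, List.mem_cons_self, hc⟩
        · exact Or.inr ⟨hp, d, List.mem_cons_of_mem _ hd, hdc⟩
      · rintro (hy | ⟨hp, d, hd, hdc⟩)
        · exact Or.inl (Or.inl hy)
        · rcases List.mem_cons.mp hd with rfl | hd'
          · exact Or.inl (Or.inr ⟨hp, hdc⟩)
          · exact Or.inr ⟨hp, d, hd', hdc⟩

theorem outer_nodup (cols : List String) (m : PySem.Set String) (hm : m.Nodup) :
    (cols.foldl (fun s col => xubioAltStep col s) m).Nodup := by
  induction cols generalizing m with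
  | nil => simpa
  | cons c rest ih => exact ih _ (step_nodup c m hm)

theorem outer_len (cols : List String) (m : PySem.Set String) :
    m.length ≤ (cols.foldl (fun s col => xubioAltStep col s) m).length := by
  induction cols generalizing m with
  | nil => simp
  | cons c rest ih =>
      rw [List.foldl_cons]
      exact le_trans (step_len c m) (ih _)

-- the early-exit loop computes "final matched set has ≥ 2 elements" when started below the threshold
theorem loop_eq (cols : List String) (m : PySem.Set String) (hlt : m.length < 2) :
    xubioAltLoop cols m = decide (2 ≤ (cols.foldl (fun s col => xubioAltStep col s) m).length) := by
  induction cols generalizing m with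
  | nil =>
      rw [xubioAltLoop, List.foldl_nil]
      have h2 : ¬ (2 ≤ m.length) := by omega
      simp [h2]
  | cons c rest ih =>
      rw [xubioAltLoop, List.foldl_cons]
      by_cases h : 2 ≤ (xubioAltStep c m).length
      · have hmono := outer_len rest (xubioAltStep c m)
        rw [if_pos h]
        have : 2 ≤ (rest.foldl (fun s col => xubioAltStep col s) (xubioAltStep c m)).length := by omega
        simp [this]
      · rw [if_neg h, ih _ (by omega)]

-- A's counting fold is countP
theorem count_fold (pats : List String) (q : String → Bool) (n : Nat) :
    pats.foldl (fun acc patron => if q patron = true then acc + 1 else acc) n = n + pats.countP q := by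
  induction pats generalizing n with
  | nil => simp
  | cons p rest ih =>
      rw [List.foldl_cons, List.countP_cons, ih]
      by_cases h : q p = true
      · rw [if_pos h, if_pos h]
        omega
      · rw [if_neg h, if_neg h]
        omega

-- the final matched set has exactly as many elements as A counts
theorem final_len (cols : List String) :
    (cols.foldl (fun s col => xubioAltStep col s) PySem.Set.empty).length
      = (["cuit", "dni", "identificador", "documento", "nombre", "razon", "cliente"] : List String).countP
          (fun patron => cols.any (fun col => PySem.Str.isIn patron col)) := by
  have hnd : (["cuit", "dni", "identificador", "documento", "nombre", "razon", "cliente"] : List String).Nodup := by decide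
  have hnil : (PySem.Set.empty : PySem.Set String).Nodup := List.nodup_nil
  have hfil := List.Nodup.filter (fun patron => cols.any (fun col => PySem.Str.isIn patron col)) hnd
  have hperm : (cols.foldl (fun s col => xubioAltStep col s) PySem.Set.empty).Perm
      ((["cuit", "dni", "identificador", "documento", "nombre", "razon", "cliente"] : List String).filter
        (fun patron => cols.any (fun col => PySem.Str.isIn patron col))) := by
    rw [List.perm_ext_iff_of_nodup (outer_nodup _ _ hnil) hfil]
    intro y
    rw [outer_mem, List.mem_filter, List.any_eq_true]
    constructor
    · rintro (hy | ⟨hp, hc⟩)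
      · exact absurd hy (List.not_mem_nil)
      · exact ⟨hp, hc⟩
    · rintro ⟨hp, hc⟩
      exact Or.inr ⟨hp, hc⟩
  rw [hperm.length_eq, List.countP_eq_length_filter]

-- ===== VERDICT (by name: the statement is the Claim_ definition above) =====
theorem es_archivo_xubio_py_spec : Claim_equal_es_archivo_xubio_py := by
  intro cols _
  unfold Spec_es_archivo_xubio_py es_archivo_xubio_py es_archivo_xubio_py_alt
  rw [loop_eq cols PySem.Set.empty (by simp [PySem.Set.empty]), final_len]
  simp only [count_fold, Nat.zero_add]
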